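-- pv_equiv track=rewrite | github.com/kim-do-hyeon/Algorithm | 프로그래머스/2/159993. 미로 탈출/미로 탈출.py | solution
-- ===== SOURCE A (Python) =====
-- from collections import deque
--
-- def bfs(maps, start, target) :
--     R, C = len(maps), len(maps[0])
--     dr = [-1, 1, 0, 0]
--     dc = [0, 0, -1, 1]
--
--     visited = [[False] * C for _ in range(R)]
--     queue = deque()
--     queue.append((*start, 0))
--     visited[start[0]][start[1]] = True
--
--     while queue :
--         r, c, dist = queue.popleft()
--
--         if maps[r][c] == target :
--             return dist
--         for i in range(4) :
--             nr, nc = r + dr[i], c + dc[i]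
--             if 0 <= nr < R and 0 <= nc < C and not visited[nr][nc] and maps[nr][nc] != 'X' :
--                 visited[nr][nc] = True
--                 queue.append((nr, nc, dist + 1))
--     return -1
--
-- def solution(maps):
--     R, C = len(maps), len(maps[0])
--     start = lever = exit = None
--
--     for r in range(R) :
--         for c in range(C) :
--             if maps[r][c] == 'S' :
--                 start = (r, c)
--             elif maps[r][c] == 'L' :
--                 lever = (r, c)
--             elif maps[r][c] == 'E' :
--                 exit = (r, c)
--
--     to_lever = bfs(maps, start, 'L')
--     if to_lever == -1 :
--         return -1
--
--     to_exit = bfs(maps, lever, 'E')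
--     if to_exit == -1 :
--         return -1
--
--
--     return to_lever + to_exit
-- ===== SOURCE B (Python) =====
-- from collections import deque
--
-- def solution(maps):
--     R, C = len(maps), len(maps[0])
--
--     def flood(src):
--         # full BFS flood from src: complete distance dict over reachable non-wall cells
--         dist = {src: 0}
--         queue = deque([src])
--         while queue:
--             r, c = queue.popleft()
--             d = dist[(r, c)]
--             for nr, nc in ((r - 1, c), (r + 1, c), (r, c - 1), (r, c + 1)):
--                 if 0 <= nr < R and 0 <= nc < C and (nr, nc) not in dist and maps[nr][nc] != 'X':
--                     dist[(nr, nc)] = d + 1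
--                     queue.append((nr, nc))
--         return dist
--
--     def nearest(dist, ch):
--         # smallest recorded distance among cells carrying marker ch (None if unreachable)
--         return min((d for (r, c), d in dist.items() if maps[r][c] == ch), default=None)
--
--     start = lever = None
--     for r in range(R):
--         for c in range(C):
--             if maps[r][c] == 'S':
--                 start = (r, c)
--             elif maps[r][c] == 'L':
--                 lever = (r, c)
--
--     to_lever = nearest(flood(start), 'L')
--     if to_lever is None:
--         return -1
--     to_exit = nearest(flood(lever), 'E')
--     if to_exit is None:
--         return -1
--     return to_lever + to_exit
-- ===== Notes on version B (the rewrite author's own statement) =====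
-- stated objective: alternative
-- what changed: Replaces the early-stopping targeted bfs(start, target) with a full-flood BFS that builds a complete cell->distance dictionary (the dict doubles as the visited set), then answers each phase by a min-query over the recorded distances of the marker cells; the marker scan keeps only start and the last lever.
import Mathlib
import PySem

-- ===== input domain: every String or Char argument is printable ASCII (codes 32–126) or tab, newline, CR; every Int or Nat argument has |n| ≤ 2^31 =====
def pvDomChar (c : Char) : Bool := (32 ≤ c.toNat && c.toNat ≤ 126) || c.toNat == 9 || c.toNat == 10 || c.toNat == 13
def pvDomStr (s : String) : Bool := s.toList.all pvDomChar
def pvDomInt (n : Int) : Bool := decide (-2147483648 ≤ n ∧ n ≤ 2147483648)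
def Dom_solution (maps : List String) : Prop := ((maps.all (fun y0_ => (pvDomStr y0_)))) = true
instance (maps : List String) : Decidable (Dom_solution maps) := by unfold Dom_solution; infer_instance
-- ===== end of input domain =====

-- B replaces A's early-stopping targeted BFS by a full-flood BFS producing a distance dictionary
-- that is then min-queried over the marker cells (objective: alternative; same asymptotic cost).

-- ===== PORT A =====
-- maps[r][c]; every use in either port is bounds-checked, or in range by Pre_solution
def pyCharAt (maps : List String) (r c : Int) : Char :=
  ((PySem.List.pyGet? maps r).bind (fun s => PySem.Str.pyGet? s c)).getD ' '

def dirsA : List (Int × Int) := [(-1, 0), (1, 0), (0, -1), (0, 1)]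

def bfsStep (maps : List String) (R C r c dist : Int)
    (st : List (Int × Int × Int) × List (Int × Int)) (d : Int × Int) :
    List (Int × Int × Int) × List (Int × Int) :=
  let nr := r + d.1
  let nc := c + d.2
  if 0 ≤ nr ∧ nr < R ∧ 0 ≤ nc ∧ nc < C ∧ (nr, nc) ∉ st.2 ∧ pyCharAt maps nr nc ≠ 'X' then
    (st.1 ++ [(nr, nc, dist + 1)], st.2 ++ [(nr, nc)])
  else st

-- the while loop; fuel R*C+1 bounds the number of pops (each pop was one enqueue,
-- enqueues are distinct grid cells), so the recursion always ends via the [] case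
def bfsLoopA (maps : List String) (target : Char) (R C : Int) :
    Nat → List (Int × Int × Int) → List (Int × Int) → Int
  | 0, _, _ => -1
  | _ + 1, [], _ => -1
  | fuel + 1, (r, c, dist) :: rest, visited =>
    if pyCharAt maps r c = target then dist
    else
      let st := dirsA.foldl (bfsStep maps R C r c dist) (rest, visited)
      bfsLoopA maps target R C fuel st.1 st.2

def bfsA (maps : List String) (start : Int × Int) (target : Char) : Int :=
  let R : Int := (maps.length : Int)
  let C : Int := ((maps.headD "").toList.length : Int)
  bfsLoopA maps target R C (maps.length * (maps.headD "").toList.length + 1)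
    [(start.1, start.2, 0)] [(start.1, start.2)]

def scanUpdA (maps : List String)
    (st : Option (Int × Int) × Option (Int × Int) × Option (Int × Int)) (rc : Int × Int) :
    Option (Int × Int) × Option (Int × Int) × Option (Int × Int) :=
  let ch := pyCharAt maps rc.1 rc.2
  if ch = 'S' then (some rc, st.2.1, st.2.2)
  else if ch = 'L' then (st.1, some rc, st.2.2)
  else if ch = 'E' then (st.1, st.2.1, some rc)
  else st

def scanA (maps : List String) (R C : Int) :
    Option (Int × Int) × Option (Int × Int) × Option (Int × Int) :=
  (PySem.List.pyRange 0 R).foldl (fun st r =>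
    (PySem.List.pyRange 0 C).foldl (fun st c => scanUpdA maps st (r, c)) st) (none, none, none)

def solution (maps : List String) : Int :=
  let R : Int := (maps.length : Int)
  let C : Int := ((maps.headD "").toList.length : Int)
  let sle := scanA maps R C
  match sle.1 with
  | none => -1   -- Python raises TypeError here (no 'S'); outside Pre_solution
  | some start =>
    let toLever := bfsA maps start 'L'
    if toLever = -1 then -1
    else
      match sle.2.1 with
      | none => -1   -- unreachable: toLever ≠ -1 forces a lever to exist
      | some lever =>
        let toExit := bfsA maps lever 'E'
        if toExit = -1 then -1 else toLever + toExit

-- ===== PORT B =====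
def floodStep (maps : List String) (R C d : Int)
    (st : List (Int × Int) × PySem.Dict (Int × Int) Int) (nb : Int × Int) :
    List (Int × Int) × PySem.Dict (Int × Int) Int :=
  if 0 ≤ nb.1 ∧ nb.1 < R ∧ 0 ≤ nb.2 ∧ nb.2 < C ∧ st.2.contains nb = false ∧
      pyCharAt maps nb.1 nb.2 ≠ 'X' then
    (st.1 ++ [nb], st.2.insert nb (d + 1))
  else st

-- full flood: the distance dict doubles as the visited set; same fuel bound as A's loop
def floodLoop (maps : List String) (R C : Int) :
    Nat → List (Int × Int) → PySem.Dict (Int × Int) Int → PySem.Dict (Int × Int) Int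
  | 0, _, m => m
  | _ + 1, [], m => m
  | fuel + 1, (r, c) :: rest, m =>
    let d := (m.get? (r, c)).getD 0     -- dist[(r, c)]: key always present
    let st := [(r - 1, c), (r + 1, c), (r, c - 1), (r, c + 1)].foldl (floodStep maps R C d) (rest, m)
    floodLoop maps R C fuel st.1 st.2

def flood (maps : List String) (src : Int × Int) : PySem.Dict (Int × Int) Int :=
  let R : Int := (maps.length : Int)
  let C : Int := ((maps.headD "").toList.length : Int)
  floodLoop maps R C (maps.length * (maps.headD "").toList.length + 1)
    [src] (PySem.Dict.empty.insert src 0)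

-- min((d for (r, c), d in dist.items() if maps[r][c] == ch), default=None)
def nearest (maps : List String) (dist : PySem.Dict (Int × Int) Int) (ch : Char) : Option Int :=
  PySem.List.min?
    ((dist.items.filter (fun kv => pyCharAt maps kv.1.1 kv.1.2 == ch)).map (fun kv => kv.2))
    (fun x => x)

def scanUpdB (maps : List String)
    (st : Option (Int × Int) × Option (Int × Int)) (rc : Int × Int) :
    Option (Int × Int) × Option (Int × Int) :=
  let ch := pyCharAt maps rc.1 rc.2
  if ch = 'S' then (some rc, st.2)
  else if ch = 'L' then (st.1, some rc)
  else st

def scanB (maps : List String) (R C : Int) : Option (Int × Int) × Option (Int × Int) :=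
  (PySem.List.pyRange 0 R).foldl (fun st r =>
    (PySem.List.pyRange 0 C).foldl (fun st c => scanUpdB maps st (r, c)) st) (none, none)

def solution_alt (maps : List String) : Int :=
  let R : Int := (maps.length : Int)
  let C : Int := ((maps.headD "").toList.length : Int)
  let sl := scanB maps R C
  match sl.1 with
  | none => -1   -- Python: flood(None) raises; outside Pre_solution
  | some start =>
    match nearest maps (flood maps start) 'L' with
    | none => -1
    | some toLever =>
      match sl.2 with
      | none => -1   -- unreachable: a lever distance was just recorded
      | some lever =>
        match nearest maps (flood maps lever) 'E' with
        | none => -1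
        | some toExit => toLever + toExit

-- ===== PRECONDITION & SPEC =====
-- Pre_ is exactly A's non-raising domain: A raises on empty maps (IndexError on maps[0]),
-- on a row shorter than len(maps[0]) (IndexError during the marker scan), and when no 'S'
-- occurs in the scanned first len(maps[0]) columns (TypeError: bfs(None, ...)).
def Pre_solution (maps : List String) : Prop :=
  maps ≠ [] ∧ (∀ s ∈ maps, (maps.headD "").toList.length ≤ s.toList.length) ∧
  ∃ s ∈ maps, 'S' ∈ s.toList.take (maps.headD "").toList.length
instance (maps : List String) : Decidable (Pre_solution maps) := by
  unfold Pre_solution; infer_instance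

def pvWitness_solution : List String := ["SEL"]

def Spec_solution (maps : List String) (out : Int) : Prop := out = solution_alt maps
instance (maps : List String) (out : Int) : Decidable (Spec_solution maps out) := by
  unfold Spec_solution; infer_instance

-- ===== CLAIM (what is proved, stated in full; the proofs are below) =====
def Claim_equal_solution : Prop :=
  ∀ (maps : List String), Dom_solution maps → Pre_solution maps →
    Spec_solution maps (solution maps)

-- ===== LEMMAS AND PROOFS =====

def inGrid (R C : Int) (k : Int × Int) : Prop := 0 ≤ k.1 ∧ k.1 < R ∧ 0 ≤ k.2 ∧ k.2 < C

def goodD (a b : Int) : Prop := a ≤ b ∧ b ≤ a + 1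

-- the lock-step relation between A's (queue, visited) and B's (queue, dist-dict)
def SimRel (maps : List String) (target : Char) (R C : Int)
    (qA : List (Int × Int × Int)) (vis : List (Int × Int))
    (qB : List (Int × Int)) (m : PySem.Dict (Int × Int) Int) : Prop :=
  qB = qA.map (fun t => (t.1, t.2.1)) ∧
  (∀ t ∈ qA, m.get? (t.1, t.2.1) = some t.2.2) ∧
  vis = m.keys ∧
  m.keys.Nodup ∧
  (∀ k ∈ m.keys, inGrid R C k) ∧
  qB.Nodup ∧
  (∀ v ∈ m.values, 0 ≤ v) ∧
  (∀ k ∈ m.keys, k ∉ qB → pyCharAt maps k.1 k.2 ≠ target)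

lemma nbrs_eq (r c : Int) :
    [(r - 1, c), (r + 1, c), (r, c - 1), (r, c + 1)] =
      dirsA.map (fun d => (r + d.1, c + d.2)) := by
  norm_num [dirsA]; omega

lemma step_rel (maps : List String) (target : Char) (R C r c dpop : Int)
    (hd0 : 0 ≤ dpop)
    (qA : List (Int × Int × Int)) (vis : List (Int × Int))
    (qB : List (Int × Int)) (m : PySem.Dict (Int × Int) Int)
    (h : SimRel maps target R C qA vis qB m)
    (hB1 : ∀ t ∈ qA, dpop ≤ t.2.2 ∧ t.2.2 ≤ dpop + 1) (d : Int × Int) :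
    SimRel maps target R C
      (bfsStep maps R C r c dpop (qA, vis) d).1 (bfsStep maps R C r c dpop (qA, vis) d).2
      (floodStep maps R C dpop (qB, m) (r + d.1, c + d.2)).1
      (floodStep maps R C dpop (qB, m) (r + d.1, c + d.2)).2 ∧
    (∀ t ∈ (bfsStep maps R C r c dpop (qA, vis) d).1, dpop ≤ t.2.2 ∧ t.2.2 ≤ dpop + 1) ∧
    (floodStep maps R C dpop (qB, m) (r + d.1, c + d.2)).2.keys.length + qA.length =
      m.keys.length + (bfsStep maps R C r c dpop (qA, vis) d).1.length ∧
    (List.Pairwise goodD (qA.map (fun t => t.2.2)) →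
      List.Pairwise goodD ((bfsStep maps R C r c dpop (qA, vis) d).1.map (fun t => t.2.2))) := by
  obtain ⟨h1, h2, h3, h4, h5, h6, h7, h8⟩ := h
  have hsub : ∀ k ∈ qB, k ∈ m.keys := by
    intro k hk
    rw [h1] at hk
    obtain ⟨t, ht, rfl⟩ := List.mem_map.1 hk
    have := h2 t ht
    exact PySem.Dict.mem_keys_of_mem_items m (PySem.Dict.mem_items_of_get?_eq_some m this)
  by_cases hg : 0 ≤ r + d.1 ∧ r + d.1 < R ∧ 0 ≤ c + d.2 ∧ c + d.2 < C ∧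
      (r + d.1, c + d.2) ∉ vis ∧ pyCharAt maps (r + d.1) (c + d.2) ≠ 'X'
  · -- both guards fire
    obtain ⟨hb1, hb2, hb3, hb4, hnv, hnx⟩ := hg
    have hnk : (r + d.1, c + d.2) ∉ m.keys := h3 ▸ hnv
    have hnc : m.contains (r + d.1, c + d.2) = false := by
      rw [← Bool.not_eq_true, PySem.Dict.contains_iff_mem_keys]; exact hnk
    have hA : bfsStep maps R C r c dpop (qA, vis) d =
        (qA ++ [(r + d.1, c + d.2, dpop + 1)], vis ++ [(r + d.1, c + d.2)]) := by
      simp only [bfsStep]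
      rw [if_pos ⟨hb1, hb2, hb3, hb4, hnv, hnx⟩]
    have hB : floodStep maps R C dpop (qB, m) (r + d.1, c + d.2) =
        (qB ++ [(r + d.1, c + d.2)], m.insert (r + d.1, c + d.2) (dpop + 1)) := by
      simp only [floodStep]
      rw [if_pos ⟨hb1, hb2, hb3, hb4, hnc, hnx⟩]
    rw [hA, hB]
    have hnqB : (r + d.1, c + d.2) ∉ qB := fun hk => hnk (hsub _ hk)
    have hkeys' : (m.insert (r + d.1, c + d.2) (dpop + 1)).keys = m.keys ++ [(r + d.1, c + d.2)] :=
      PySem.Dict.keys_insert_of_not_contains m _ hnc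
    refine ⟨⟨by simp [h1], ?_, ?_, PySem.Dict.nodup_keys_insert m _ _ h4, ?_, ?_, ?_, ?_⟩, ?_, ?_, ?_⟩
    · intro t ht
      rcases List.mem_append.1 ht with ht | ht
      · have hold := h2 t ht
        have : (t.1, t.2.1) ≠ (r + d.1, c + d.2) := by
          intro he
          exact hnk (he ▸ PySem.Dict.mem_keys_of_mem_items m (PySem.Dict.mem_items_of_get?_eq_some m hold))
        rw [PySem.Dict.get?_insert, if_neg this]
        exact hold
      · simp only [List.mem_singleton] at ht
        subst ht
        exact PySem.Dict.get?_insert_self m _ _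
    · rw [hkeys', h3]
    · intro k hk
      rw [hkeys'] at hk
      rcases List.mem_append.1 hk with hk | hk
      · exact h5 k hk
      · simp only [List.mem_singleton] at hk
        subst hk
        exact ⟨hb1, hb2, hb3, hb4⟩
    · have hdisj : qB.Disjoint [(r + d.1, c + d.2)] := by
        intro a ha hb
        rw [List.mem_singleton] at hb
        subst hb
        exact hnqB ha
      rw [List.nodup_append]
      exact ⟨h6, List.nodup_singleton _, fun a ha b hb => by
        rw [List.mem_singleton] at hb; subst hb; intro he; exact hnqB (he ▸ ha)⟩
    · intro v hv
      rcases PySem.Dict.mem_values_insert m _ _ _ hv with rfl | hv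
      · omega
      · exact h7 v hv
    · intro k hk hq
      rw [hkeys'] at hk
      rcases List.mem_append.1 hk with hk | hk
      · exact h8 k hk (fun hin => hq (List.mem_append_left _ hin))
      · simp only [List.mem_singleton] at hk
        subst hk
        exact absurd (List.mem_append_right _ (List.mem_singleton.2 rfl)) hq
    · intro t ht
      rcases List.mem_append.1 ht with ht | ht
      · exact hB1 t ht
      · simp only [List.mem_singleton] at ht
        subst ht
        exact ⟨show dpop ≤ dpop + 1 by omega, show dpop + 1 ≤ dpop + 1 by omega⟩
    · rw [hkeys']
      simp
      omega
    · intro hpw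
      rw [List.map_append]
      rw [List.pairwise_append]
      refine ⟨hpw, by simp [goodD], ?_⟩
      intro a ha b hb
      simp only [List.map_cons, List.map_nil, List.mem_singleton] at hb
      subst hb
      obtain ⟨t, ht, rfl⟩ := List.mem_map.1 ha
      have := hB1 t ht
      exact ⟨by omega, by omega⟩
  · -- neither guard fires
    have hnc : ¬ (0 ≤ r + d.1 ∧ r + d.1 < R ∧ 0 ≤ c + d.2 ∧ c + d.2 < C ∧
        m.contains (r + d.1, c + d.2) = false ∧ pyCharAt maps (r + d.1) (c + d.2) ≠ 'X') := by
      intro ⟨hb1, hb2, hb3, hb4, hcc, hnx⟩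
      apply hg
      refine ⟨hb1, hb2, hb3, hb4, ?_, hnx⟩
      rw [h3]
      rw [← PySem.Dict.contains_iff_mem_keys]
      simp [hcc]
    have hA : bfsStep maps R C r c dpop (qA, vis) d = (qA, vis) := by
      simp only [bfsStep]
      rw [if_neg hg]
    have hB : floodStep maps R C dpop (qB, m) (r + d.1, c + d.2) = (qB, m) := by
      simp only [floodStep]
      rw [if_neg hnc]
    rw [hA, hB]
    exact ⟨⟨h1, h2, h3, h4, h5, h6, h7, h8⟩, hB1, by simp, fun h => h⟩

lemma fold_rel (maps : List String) (target : Char) (R C r c dpop : Int)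
    (hd0 : 0 ≤ dpop) :
    ∀ (ds : List (Int × Int)) (qA : List (Int × Int × Int)) (vis : List (Int × Int))
      (qB : List (Int × Int)) (m : PySem.Dict (Int × Int) Int),
    SimRel maps target R C qA vis qB m →
    (∀ t ∈ qA, dpop ≤ t.2.2 ∧ t.2.2 ≤ dpop + 1) →
    List.Pairwise goodD (qA.map (fun t => t.2.2)) →
    SimRel maps target R C
      (ds.foldl (bfsStep maps R C r c dpop) (qA, vis)).1
      (ds.foldl (bfsStep maps R C r c dpop) (qA, vis)).2
      ((ds.map (fun d => (r + d.1, c + d.2))).foldl (floodStep maps R C dpop) (qB, m)).1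
      ((ds.map (fun d => (r + d.1, c + d.2))).foldl (floodStep maps R C dpop) (qB, m)).2 ∧
    (∀ t ∈ (ds.foldl (bfsStep maps R C r c dpop) (qA, vis)).1, dpop ≤ t.2.2 ∧ t.2.2 ≤ dpop + 1) ∧
    ((ds.map (fun d => (r + d.1, c + d.2))).foldl (floodStep maps R C dpop) (qB, m)).2.keys.length
        + qA.length =
      m.keys.length + (ds.foldl (bfsStep maps R C r c dpop) (qA, vis)).1.length ∧
    List.Pairwise goodD ((ds.foldl (bfsStep maps R C r c dpop) (qA, vis)).1.map (fun t => t.2.2)) := by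
  intro ds
  induction ds with
  | nil =>
    intro qA vis qB m h hB1 hpw
    exact ⟨h, hB1, by simp, hpw⟩
  | cons d ds ih =>
    intro qA vis qB m h hB1 hpw
    obtain ⟨hrel, hb1', hlen, hpw'⟩ := step_rel maps target R C r c dpop hd0 qA vis qB m h hB1 d
    have hih := ih (bfsStep maps R C r c dpop (qA, vis) d).1
      (bfsStep maps R C r c dpop (qA, vis) d).2
      (floodStep maps R C dpop (qB, m) (r + d.1, c + d.2)).1
      (floodStep maps R C dpop (qB, m) (r + d.1, c + d.2)).2
      hrel hb1' (hpw' hpw)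
    simp only [Prod.mk.eta] at hih
    simp only [List.map_cons, List.foldl_cons]
    obtain ⟨hih1, hih2, hih3, hih4⟩ := hih
    exact ⟨hih1, hih2, by omega, hih4⟩

lemma flood_step_facts (maps : List String) (R C lb dpop : Int) (hlb : lb ≤ dpop)
    (qB : List (Int × Int)) (m : PySem.Dict (Int × Int) Int)
    (hnd : m.keys.Nodup) (hg : ∀ k ∈ m.keys, inGrid R C k)
    (hv : ∀ v ∈ m.values, 0 ≤ v) (h0 : 0 ≤ dpop)
    (hq : ∀ k ∈ qB, ∃ v, m.get? k = some v ∧ lb ≤ v) (nb : Int × Int) :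
    (floodStep maps R C dpop (qB, m) nb).2.keys.Nodup ∧
    (∀ k ∈ (floodStep maps R C dpop (qB, m) nb).2.keys, inGrid R C k) ∧
    (∀ v ∈ (floodStep maps R C dpop (qB, m) nb).2.values, 0 ≤ v) ∧
    (∀ k ∈ (floodStep maps R C dpop (qB, m) nb).1,
      ∃ v, (floodStep maps R C dpop (qB, m) nb).2.get? k = some v ∧ lb ≤ v) ∧
    (∀ k v, m.get? k = some v → (floodStep maps R C dpop (qB, m) nb).2.get? k = some v) ∧
    (∀ k v, (floodStep maps R C dpop (qB, m) nb).2.get? k = some v →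
      m.get? k = some v ∨ lb + 1 ≤ v) := by
  by_cases hgd : 0 ≤ nb.1 ∧ nb.1 < R ∧ 0 ≤ nb.2 ∧ nb.2 < C ∧ m.contains nb = false ∧
      pyCharAt maps nb.1 nb.2 ≠ 'X'
  · obtain ⟨hb1, hb2, hb3, hb4, hcc, hnx⟩ := hgd
    have hB : floodStep maps R C dpop (qB, m) nb = (qB ++ [nb], m.insert nb (dpop + 1)) := by
      simp only [floodStep]
      rw [if_pos ⟨hb1, hb2, hb3, hb4, hcc, hnx⟩]
    have hget_nb : m.get? nb = none := by
      have := PySem.Dict.contains_eq_isSome_get? m nb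
      rw [hcc] at this
      cases hgn : m.get? nb with
      | none => rfl
      | some v => rw [hgn] at this; simp at this
    have hkeys' : (m.insert nb (dpop + 1)).keys = m.keys ++ [nb] :=
      PySem.Dict.keys_insert_of_not_contains m _ hcc
    rw [hB]
    refine ⟨PySem.Dict.nodup_keys_insert m _ _ hnd, ?_, ?_, ?_, ?_, ?_⟩
    · intro k hk
      rw [hkeys'] at hk
      rcases List.mem_append.1 hk with hk | hk
      · exact hg k hk
      · rw [List.mem_singleton] at hk
        subst hk
        exact ⟨hb1, hb2, hb3, hb4⟩
    · intro v hvv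
      rcases PySem.Dict.mem_values_insert m _ _ _ hvv with rfl | hvv
      · omega
      · exact hv v hvv
    · intro k hk
      rcases List.mem_append.1 hk with hk | hk
      · obtain ⟨v, hkv, hlv⟩ := hq k hk
        have hne : k ≠ nb := fun he => by rw [he, hget_nb] at hkv; cases hkv
        exact ⟨v, by rw [PySem.Dict.get?_insert, if_neg hne]; exact hkv, hlv⟩
      · rw [List.mem_singleton] at hk
        subst hk
        exact ⟨dpop + 1, PySem.Dict.get?_insert_self m _ _, by omega⟩
    · intro k v hkv
      have hne : k ≠ nb := fun he => by rw [he, hget_nb] at hkv; cases hkv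
      rw [PySem.Dict.get?_insert, if_neg hne]
      exact hkv
    · intro k v hkv
      rw [PySem.Dict.get?_insert] at hkv
      split_ifs at hkv with hke
      · right
        injection hkv with hkv
        omega
      · exact Or.inl hkv
  · have hB : floodStep maps R C dpop (qB, m) nb = (qB, m) := by
      simp only [floodStep]
      rw [if_neg hgd]
    rw [hB]
    exact ⟨hnd, hg, hv, hq, fun _ _ h => h, fun _ _ h => Or.inl h⟩

lemma flood_fold (maps : List String) (R C lb dpop : Int) (hlb : lb ≤ dpop) :
    ∀ (ds : List (Int × Int)) (qB : List (Int × Int)) (m : PySem.Dict (Int × Int) Int),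
    m.keys.Nodup → (∀ k ∈ m.keys, inGrid R C k) → (∀ v ∈ m.values, 0 ≤ v) → 0 ≤ dpop →
    (∀ k ∈ qB, ∃ v, m.get? k = some v ∧ lb ≤ v) →
    (ds.foldl (floodStep maps R C dpop) (qB, m)).2.keys.Nodup ∧
    (∀ k ∈ (ds.foldl (floodStep maps R C dpop) (qB, m)).2.keys, inGrid R C k) ∧
    (∀ v ∈ (ds.foldl (floodStep maps R C dpop) (qB, m)).2.values, 0 ≤ v) ∧
    (∀ k ∈ (ds.foldl (floodStep maps R C dpop) (qB, m)).1,
      ∃ v, (ds.foldl (floodStep maps R C dpop) (qB, m)).2.get? k = some v ∧ lb ≤ v) ∧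
    (∀ k v, m.get? k = some v → (ds.foldl (floodStep maps R C dpop) (qB, m)).2.get? k = some v) ∧
    (∀ k v, (ds.foldl (floodStep maps R C dpop) (qB, m)).2.get? k = some v →
      m.get? k = some v ∨ lb + 1 ≤ v) := by
  intro ds
  induction ds with
  | nil =>
    intro qB m hnd hg hv h0 hq
    exact ⟨hnd, hg, hv, hq, fun _ _ h => h, fun _ _ h => Or.inl h⟩
  | cons nb ds ih =>
    intro qB m hnd hg hv h0 hq
    obtain ⟨hnd', hg', hv', hq', hext, hnew⟩ :=
      flood_step_facts maps R C lb dpop hlb qB m hnd hg hv h0 hq nb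
    have hih := ih (floodStep maps R C dpop (qB, m) nb).1 (floodStep maps R C dpop (qB, m) nb).2
      hnd' hg' hv' h0 hq'
    simp only [Prod.mk.eta] at hih
    simp only [List.foldl_cons]
    obtain ⟨a1, a2, a3, a4, a5, a6⟩ := hih
    refine ⟨a1, a2, a3, a4, fun k v h => a5 k v (hext k v h), fun k v h => ?_⟩
    rcases a6 k v h with h' | h'
    · exact hnew k v h'
    · exact Or.inr h'

lemma flood_lb (maps : List String) (R C lb : Int) :
    ∀ (fuel : Nat) (qB : List (Int × Int)) (m : PySem.Dict (Int × Int) Int),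
    m.keys.Nodup → (∀ k ∈ m.keys, inGrid R C k) → (∀ v ∈ m.values, 0 ≤ v) →
    (∀ k ∈ qB, ∃ v, m.get? k = some v ∧ lb ≤ v) →
    (floodLoop maps R C fuel qB m).keys.Nodup ∧
    (∀ k ∈ (floodLoop maps R C fuel qB m).keys, inGrid R C k) ∧
    (∀ v ∈ (floodLoop maps R C fuel qB m).values, 0 ≤ v) ∧
    (∀ k v, m.get? k = some v → (floodLoop maps R C fuel qB m).get? k = some v) ∧
    (∀ k v, (floodLoop maps R C fuel qB m).get? k = some v →
      m.get? k = some v ∨ lb + 1 ≤ v) := by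
  intro fuel
  induction fuel with
  | zero =>
    intro qB m hnd hg hv hq
    simp only [floodLoop]
    exact ⟨hnd, hg, hv, fun _ _ h => h, fun _ _ h => Or.inl h⟩
  | succ fuel ih =>
    intro qB m hnd hg hv hq
    match qB with
    | [] =>
      simp only [floodLoop]
      exact ⟨hnd, hg, hv, fun _ _ h => h, fun _ _ h => Or.inl h⟩
    | (r, c) :: rest =>
      obtain ⟨d, hd, hld⟩ := hq (r, c) (List.mem_cons_self ..)
      have h0d : 0 ≤ d := by
        apply hv d
        have hm := PySem.Dict.mem_items_of_get?_eq_some m hd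
        simp only [PySem.Dict.values]
        exact List.mem_map.2 ⟨_, hm, rfl⟩
      have hdg : (m.get? (r, c)).getD 0 = d := by rw [hd]; rfl
      have hqr : ∀ k ∈ rest, ∃ v, m.get? k = some v ∧ lb ≤ v :=
        fun k hk => hq k (List.mem_cons_of_mem _ hk)
      obtain ⟨b1, b2, b3, b4, b5, b6⟩ :=
        flood_fold maps R C lb d hld [(r - 1, c), (r + 1, c), (r, c - 1), (r, c + 1)]
          rest m hnd hg hv h0d hqr
      have hih := ih
        ([(r - 1, c), (r + 1, c), (r, c - 1), (r, c + 1)].foldl (floodStep maps R C d) (rest, m)).1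
        ([(r - 1, c), (r + 1, c), (r, c - 1), (r, c + 1)].foldl (floodStep maps R C d) (rest, m)).2
        b1 b2 b3 b4
      have hunf : floodLoop maps R C (fuel + 1) ((r, c) :: rest) m =
          floodLoop maps R C fuel
            ([(r - 1, c), (r + 1, c), (r, c - 1), (r, c + 1)].foldl (floodStep maps R C d) (rest, m)).1
            ([(r - 1, c), (r + 1, c), (r, c - 1), (r, c + 1)].foldl (floodStep maps R C d) (rest, m)).2 := by
        simp only [floodLoop, hdg]
      rw [hunf]
      obtain ⟨a1, a2, a3, a4, a5⟩ := hih
      refine ⟨a1, a2, a3, fun k v h => a4 k v (b5 k v h), fun k v h => ?_⟩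
      rcases a5 k v h with h' | h'
      · exact b6 k v h'
      · exact Or.inr h'

lemma card_grid (R C : Int) (l : List (Int × Int)) (hnd : l.Nodup)
    (hg : ∀ k ∈ l, inGrid R C k) : l.length ≤ R.toNat * C.toNat := by
  have hsub : l ⊆ ((List.range R.toNat).product (List.range C.toNat)).map
      (fun p => ((p.1 : Int), (p.2 : Int))) := by
    intro k hk
    obtain ⟨g1, g2, g3, g4⟩ := hg k hk
    refine List.mem_map.2 ⟨(k.1.toNat, k.2.toNat), ?_, ?_⟩
    · rw [List.pair_mem_product]
      constructor <;> rw [List.mem_range] <;> omega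
    · have e1 : ((k.1.toNat : Int), (k.2.toNat : Int)) = (k.1, k.2) := by
        rw [Prod.mk.injEq]
        constructor <;> omega
      rw [e1]
  have h := (List.subperm_of_subset hnd hsub).length_le
  simp only [List.product, List.length_flatMap, List.length_map, List.length_range,
    List.map_const', List.sum_replicate, smul_eq_mul] at h
  exact h

lemma nearest_none (maps : List String) (target : Char) (m : PySem.Dict (Int × Int) Int)
    (h : ∀ k ∈ m.keys, pyCharAt maps k.1 k.2 ≠ target) :
    nearest maps m target = none := by
  unfold nearest
  rw [PySem.List.min?_eq_none_iff, List.map_eq_nil_iff, List.filter_eq_nil_iff]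
  intro kv hkv
  have := h kv.1 (PySem.Dict.mem_keys_of_mem_items m hkv)
  simp only [beq_iff_eq]
  exact fun he => this he

lemma main_sim (maps : List String) (target : Char) (R C : Int) :
    ∀ (fuel : Nat) (qA : List (Int × Int × Int)) (vis : List (Int × Int))
      (qB : List (Int × Int)) (m : PySem.Dict (Int × Int) Int),
    SimRel maps target R C qA vis qB m →
    List.Pairwise goodD (qA.map (fun t => t.2.2)) →
    qA.length + R.toNat * C.toNat ≤ fuel + m.keys.length →
    bfsLoopA maps target R C fuel qA vis =
      (nearest maps (floodLoop maps R C fuel qB m) target).getD (-1) ∧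
    (floodLoop maps R C fuel qB m).keys.Nodup ∧
    (∀ k ∈ (floodLoop maps R C fuel qB m).keys, inGrid R C k) ∧
    (∀ v ∈ (floodLoop maps R C fuel qB m).values, 0 ≤ v) := by
  intro fuel
  induction fuel with
  | zero =>
    intro qA vis qB m hrel hpw hfuel
    obtain ⟨h1, h2, h3, h4, h5, h6, h7, h8⟩ := hrel
    rcases qA with _ | ⟨⟨r, c, dpop⟩, rest⟩
    · have hqB : qB = [] := by rw [h1]; rfl
      subst hqB
      simp only [bfsLoopA, floodLoop]
      refine ⟨?_, h4, h5, h7⟩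
      rw [nearest_none maps target m (fun k hk => h8 k hk (List.not_mem_nil))]
      rfl
    · exfalso
      have := card_grid R C m.keys h4 h5
      simp only [List.length_cons] at hfuel
      omega
  | succ fuel ih =>
    intro qA vis qB m hrel hpw hfuel
    obtain ⟨h1, h2, h3, h4, h5, h6, h7, h8⟩ := hrel
    rcases qA with _ | ⟨⟨r, c, dpop⟩, rest⟩
    · have hqB : qB = [] := by rw [h1]; rfl
      subst hqB
      simp only [bfsLoopA, floodLoop]
      refine ⟨?_, h4, h5, h7⟩
      rw [nearest_none maps target m (fun k hk => h8 k hk (List.not_mem_nil))]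
      rfl
    · have hqB : qB = (r, c) :: rest.map (fun t => (t.1, t.2.1)) := by rw [h1]; rfl
      have hget : m.get? (r, c) = some dpop := h2 _ (List.mem_cons_self ..)
      have h0d : 0 ≤ dpop := by
        apply h7 dpop
        have hm := PySem.Dict.mem_items_of_get?_eq_some m hget
        simp only [PySem.Dict.values]
        exact List.mem_map.2 ⟨_, hm, rfl⟩
      rw [List.map_cons] at hpw
      rw [List.pairwise_cons] at hpw
      obtain ⟨hphead, hptail⟩ := hpw
      by_cases htgt : pyCharAt maps r c = target
      · -- A pops the first target cell and returns dpop; B floods on: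
        -- every distance recorded later is > dpop, so the min-query returns dpop too
        have hbfs : bfsLoopA maps target R C (fuel + 1) ((r, c, dpop) :: rest) vis = dpop := by
          simp only [bfsLoopA]
          rw [if_pos htgt]
        have hqlb : ∀ k ∈ qB, ∃ v, m.get? k = some v ∧ dpop ≤ v := by
          rw [hqB]
          intro k hk
          rcases List.mem_cons.1 hk with rfl | hk
          · exact ⟨dpop, hget, le_refl _⟩
          · obtain ⟨t, ht, rfl⟩ := List.mem_map.1 hk
            refine ⟨t.2.2, h2 t (List.mem_cons_of_mem _ ht), ?_⟩
            have := hphead t.2.2 (List.mem_map.2 ⟨t, ht, rfl⟩)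
            exact this.1
        obtain ⟨f1, f2, f3, f4, f5⟩ := flood_lb maps R C dpop (fuel + 1) qB m h4 h5 h7 hqlb
        have hg' : (floodLoop maps R C (fuel + 1) qB m).get? (r, c) = some dpop := f4 _ _ hget
        have hmemv : dpop ∈ (((floodLoop maps R C (fuel + 1) qB m).items.filter
            (fun kv => pyCharAt maps kv.1.1 kv.1.2 == target)).map (fun kv => kv.2)) := by
          refine List.mem_map.2 ⟨((r, c), dpop), List.mem_filter.2 ⟨?_, ?_⟩, rfl⟩
          · exact PySem.Dict.mem_items_of_get?_eq_some _ hg'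
          · simp only [beq_iff_eq]
            exact htgt
        have hlbv : ∀ v ∈ (((floodLoop maps R C (fuel + 1) qB m).items.filter
            (fun kv => pyCharAt maps kv.1.1 kv.1.2 == target)).map (fun kv => kv.2)), dpop ≤ v := by
          intro v hv
          obtain ⟨kv, hkvf, rfl⟩ := List.mem_map.1 hv
          obtain ⟨hkvi, hkvp⟩ := List.mem_filter.1 hkvf
          simp only [beq_iff_eq] at hkvp
          have hkget : (floodLoop maps R C (fuel + 1) qB m).get? kv.1 = some kv.2 :=
            PySem.Dict.get?_of_mem_items _ hkvi f1
          rcases f5 _ _ hkget with hold | hge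
          · have hkk : kv.1 ∈ m.keys :=
              PySem.Dict.mem_keys_of_mem_items m (PySem.Dict.mem_items_of_get?_eq_some m hold)
            by_cases hin : kv.1 ∈ qB
            · obtain ⟨v', hv', hle⟩ := hqlb kv.1 hin
              rw [hold] at hv'
              injection hv' with hv'
              omega
            · exact absurd hkvp (h8 kv.1 hkk hin)
          · omega
        have hnear : nearest maps (floodLoop maps R C (fuel + 1) qB m) target = some dpop := by
          unfold nearest
          cases hmin : PySem.List.min? (((floodLoop maps R C (fuel + 1) qB m).items.filter
              (fun kv => pyCharAt maps kv.1.1 kv.1.2 == target)).map (fun kv => kv.2))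
              (fun x => x) with
          | none =>
            rw [PySem.List.min?_eq_none_iff] at hmin
            rw [hmin] at hmemv
            cases hmemv
          | some x =>
            have hx1 : x ∈ _ := PySem.List.min?_mem hmin
            have hx2 := PySem.List.min?_isMin hmin dpop hmemv
            have hx3 := hlbv x hx1
            have : x = dpop := le_antisymm hx2 hx3
            rw [this]
        rw [hbfs, hnear]
        exact ⟨rfl, f1, f2, f3⟩
      · -- lock step: both loops expand the same neighbours and recurse
        have hbfs : bfsLoopA maps target R C (fuel + 1) ((r, c, dpop) :: rest) vis =
            bfsLoopA maps target R C fuel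
              (dirsA.foldl (bfsStep maps R C r c dpop) (rest, vis)).1
              (dirsA.foldl (bfsStep maps R C r c dpop) (rest, vis)).2 := by
          simp only [bfsLoopA]
          rw [if_neg htgt]
        have hdg : (m.get? (r, c)).getD 0 = dpop := by rw [hget]; rfl
        have hfl : floodLoop maps R C (fuel + 1) qB m =
            floodLoop maps R C fuel
              ((dirsA.map (fun d => (r + d.1, c + d.2))).foldl (floodStep maps R C dpop)
                (rest.map (fun t => (t.1, t.2.1)), m)).1
              ((dirsA.map (fun d => (r + d.1, c + d.2))).foldl (floodStep maps R C dpop)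
                (rest.map (fun t => (t.1, t.2.1)), m)).2 := by
          rw [hqB]
          simp only [floodLoop, hdg, nbrs_eq r c]
        have hrestnd : (rest.map (fun t => (t.1, t.2.1))).Nodup := by
          rw [hqB] at h6
          exact (List.nodup_cons.1 h6).2
        have hrcnot : (r, c) ∉ rest.map (fun t => (t.1, t.2.1)) := by
          rw [hqB] at h6
          exact (List.nodup_cons.1 h6).1
        have hrel' : SimRel maps target R C rest vis (rest.map (fun t => (t.1, t.2.1))) m := by
          refine ⟨rfl, fun t ht => h2 t (List.mem_cons_of_mem _ ht), h3, h4, h5, hrestnd, h7, ?_⟩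
          intro k hk hnin
          by_cases hkrc : k = (r, c)
          · subst hkrc
            exact htgt
          · apply h8 k hk
            rw [hqB]
            intro hmem
            rcases List.mem_cons.1 hmem with h' | h'
            · exact hkrc h'
            · exact hnin h'
        have hB1 : ∀ t ∈ rest, dpop ≤ t.2.2 ∧ t.2.2 ≤ dpop + 1 := by
          intro t ht
          exact hphead t.2.2 (List.mem_map.2 ⟨t, ht, rfl⟩)
        obtain ⟨frel, fB1, flen, fpw⟩ :=
          fold_rel maps target R C r c dpop h0d dirsA rest vis
            (rest.map (fun t => (t.1, t.2.1))) m hrel' hB1 hptail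
        have hih := ih (dirsA.foldl (bfsStep maps R C r c dpop) (rest, vis)).1
          (dirsA.foldl (bfsStep maps R C r c dpop) (rest, vis)).2
          ((dirsA.map (fun d => (r + d.1, c + d.2))).foldl (floodStep maps R C dpop)
            (rest.map (fun t => (t.1, t.2.1)), m)).1
          ((dirsA.map (fun d => (r + d.1, c + d.2))).foldl (floodStep maps R C dpop)
            (rest.map (fun t => (t.1, t.2.1)), m)).2
          frel fpw (by simp only [List.length_cons] at hfuel; omega)
        rw [hbfs, hfl]
        exact hih

-- scan lemmas
lemma charAt_eq (maps : List String) (i j : Nat) (hi : i < maps.length)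
    (hj : j < maps[i].toList.length) :
    pyCharAt maps (i : Int) (j : Int) = maps[i].toList[j] := by
  unfold pyCharAt
  rw [PySem.List.pyGet?_natCast, List.getElem?_eq_getElem hi]
  simp [PySem.Str.pyGet?_eq, PySem.Chars.pyGet?, PySem.List.pyGet?_natCast,
    List.getElem?_eq_getElem hj]

lemma foldl_reach {α β : Type} (P : α → Prop) (f : α → β → α) (l : List β) (init : α)
    (x0 : β) (hx0 : x0 ∈ l) (hset : ∀ st, P (f st x0))
    (hkeep : ∀ st x, P st → P (f st x)) : P (l.foldl f init) := by
  induction l generalizing init with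
  | nil => cases hx0
  | cons y l ih =>
    rcases List.mem_cons.1 hx0 with rfl | hx0
    · rw [List.foldl_cons]
      exact List.foldlRecOn l f (hset init) (fun b hb a _ => hkeep b a hb)
    · exact ih (f init y) hx0

lemma scanB_eq (maps : List String) (R C : Int) :
    scanB maps R C = ((scanA maps R C).1, (scanA maps R C).2.1) := by
  unfold scanA scanB
  have hstep : ∀ (st : Option (Int × Int) × Option (Int × Int) × Option (Int × Int))
      (rc : Int × Int),
      scanUpdB maps (st.1, st.2.1) rc = ((scanUpdA maps st rc).1, (scanUpdA maps st rc).2.1) := by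
    intro st rc
    unfold scanUpdA scanUpdB
    dsimp only
    split_ifs <;> rfl
  have houter : ∀ (st : Option (Int × Int) × Option (Int × Int) × Option (Int × Int)) (r : Int),
      (PySem.List.pyRange 0 C).foldl (fun st c => scanUpdB maps st (r, c)) (st.1, st.2.1) =
      (((PySem.List.pyRange 0 C).foldl (fun st c => scanUpdA maps st (r, c)) st).1,
       ((PySem.List.pyRange 0 C).foldl (fun st c => scanUpdA maps st (r, c)) st).2.1) :=
    fun st r => List.foldl_hom (fun st => (st.1, st.2.1)) (fun st c => hstep st (r, c))
  exact List.foldl_hom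
    (f := fun st : Option (Int × Int) × Option (Int × Int) × Option (Int × Int) => (st.1, st.2.1))
    (g₁ := fun st r => (PySem.List.pyRange 0 C).foldl (fun st c => scanUpdA maps st (r, c)) st)
    (g₂ := fun st r => (PySem.List.pyRange 0 C).foldl (fun st c => scanUpdB maps st (r, c)) st)
    (l := PySem.List.pyRange 0 R) (init := (none, none, none))
    houter

lemma scanA_sound (maps : List String) (R C : Int) :
    (∀ p, (scanA maps R C).1 = some p → inGrid R C p ∧ pyCharAt maps p.1 p.2 = 'S') ∧
    (∀ p, (scanA maps R C).2.1 = some p → inGrid R C p ∧ pyCharAt maps p.1 p.2 = 'L') := by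
  unfold scanA
  refine List.foldlRecOn (motive := (fun st : Option (Int × Int) × Option (Int × Int) × Option (Int × Int) => (∀ p, st.1 = some p → inGrid R C p ∧ pyCharAt maps p.1 p.2 = 'S') ∧ (∀ p, st.2.1 = some p → inGrid R C p ∧ pyCharAt maps p.1 p.2 = 'L'))) _ _ ⟨(fun p h => by simp at h), (fun p h => by simp at h)⟩ ?_
  intro st hst r hr
  refine List.foldlRecOn (motive := (fun st : Option (Int × Int) × Option (Int × Int) × Option (Int × Int) => (∀ p, st.1 = some p → inGrid R C p ∧ pyCharAt maps p.1 p.2 = 'S') ∧ (∀ p, st.2.1 = some p → inGrid R C p ∧ pyCharAt maps p.1 p.2 = 'L'))) _ _ hst ?_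
  intro st' hst' c hc
  rw [PySem.List.mem_pyRange_one] at hr hc
  unfold scanUpdA
  dsimp only
  split_ifs with hS hL hE
  · exact ⟨(fun p h => by cases h; exact ⟨⟨hr.1, hr.2, hc.1, hc.2⟩, hS⟩), hst'.2⟩
  · exact ⟨hst'.1, (fun p h => by cases h; exact ⟨⟨hr.1, hr.2, hc.1, hc.2⟩, hL⟩)⟩
  · exact ⟨hst'.1, hst'.2⟩
  · exact hst'

lemma scanA_finds_S (maps : List String) (R C : Int)
    (h : ∃ k, inGrid R C k ∧ pyCharAt maps k.1 k.2 = 'S') :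
    (scanA maps R C).1.isSome := by
  obtain ⟨⟨kr, kc⟩, ⟨g1, g2, g3, g4⟩, hch⟩ := h
  unfold scanA
  refine foldl_reach (fun st : Option (Int × Int) × Option (Int × Int) × Option (Int × Int) => st.1.isSome) _ _ _ kr
    (PySem.List.mem_pyRange_one.2 ⟨g1, g2⟩) ?_ ?_
  · intro st
    refine foldl_reach (fun st : Option (Int × Int) × Option (Int × Int) × Option (Int × Int) => st.1.isSome) _ _ _ kc
      (PySem.List.mem_pyRange_one.2 ⟨g3, g4⟩) ?_ ?_
    · intro st'
      unfold scanUpdA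
      dsimp only
      rw [if_pos hch]
      rfl
    · intro st' x h'
      unfold scanUpdA
      dsimp only
      split_ifs <;> simp_all
  · intro st x h'
    refine List.foldlRecOn (motive := fun st : Option (Int × Int) × Option (Int × Int) ×
        Option (Int × Int) => st.1.isSome = true) _ _ h' ?_
    intro st' hst' c _
    unfold scanUpdA
    dsimp only
    split_ifs <;> simp_all

lemma scanA_finds_L (maps : List String) (R C : Int)
    (h : ∃ k, inGrid R C k ∧ pyCharAt maps k.1 k.2 = 'L') :
    (scanA maps R C).2.1.isSome := by
  obtain ⟨⟨kr, kc⟩, ⟨g1, g2, g3, g4⟩, hch⟩ := h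
  unfold scanA
  refine foldl_reach (fun st : Option (Int × Int) × Option (Int × Int) × Option (Int × Int) => st.2.1.isSome) _ _ _ kr
    (PySem.List.mem_pyRange_one.2 ⟨g1, g2⟩) ?_ ?_
  · intro st
    refine foldl_reach (fun st : Option (Int × Int) × Option (Int × Int) × Option (Int × Int) => st.2.1.isSome) _ _ _ kc
      (PySem.List.mem_pyRange_one.2 ⟨g3, g4⟩) ?_ ?_
    · intro st'
      unfold scanUpdA
      dsimp only
      have : pyCharAt maps kr kc ≠ 'S' := by rw [hch]; decide
      rw [if_neg this, if_pos hch]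
      rfl
    · intro st' x h'
      unfold scanUpdA
      dsimp only
      split_ifs <;> simp_all
  · intro st x h'
    refine List.foldlRecOn (motive := fun st : Option (Int × Int) × Option (Int × Int) ×
        Option (Int × Int) => st.2.1.isSome = true) _ _ h' ?_
    intro st' hst' c _
    unfold scanUpdA
    dsimp only
    split_ifs <;> simp_all

lemma nearest_some (maps : List String) (m : PySem.Dict (Int × Int) Int) (ch : Char) (d : Int)
    (h : nearest maps m ch = some d) :
    d ∈ m.values ∧ ∃ k, k ∈ m.keys ∧ pyCharAt maps k.1 k.2 = ch := by
  unfold nearest at h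
  have hm := PySem.List.min?_mem h
  obtain ⟨kv, hkv, rfl⟩ := List.mem_map.1 hm
  obtain ⟨hitems, hp⟩ := List.mem_filter.1 hkv
  simp only [beq_iff_eq] at hp
  refine ⟨?_, kv.1, PySem.Dict.mem_keys_of_mem_items m hitems, hp⟩
  simp only [PySem.Dict.values]
  exact List.mem_map.2 ⟨kv, hitems, rfl⟩

lemma bfs_eq_flood (maps : List String) (target : Char) (src : Int × Int)
    (hg : inGrid (maps.length : Int) ((maps.headD "").toList.length : Int) src) :
    bfsA maps src target = (nearest maps (flood maps src) target).getD (-1) ∧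
    (flood maps src).keys.Nodup ∧
    (∀ k ∈ (flood maps src).keys,
      inGrid (maps.length : Int) ((maps.headD "").toList.length : Int) k) ∧
    (∀ v ∈ (flood maps src).values, 0 ≤ v) := by
  have hm0 : (PySem.Dict.empty.insert src (0 : Int)).keys = [src] := by
    rw [PySem.Dict.keys_insert_of_not_contains _ _ (PySem.Dict.contains_empty src)]
    rw [PySem.Dict.keys_empty]
    rfl
  have hi0 : (PySem.Dict.empty.insert src (0 : Int)).items = [(src, 0)] := by
    rw [PySem.Dict.items_insert_of_not_contains _ _ (PySem.Dict.contains_empty src)]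
    rfl
  have hrel : SimRel maps target (maps.length : Int) ((maps.headD "").toList.length : Int)
      [(src.1, src.2, 0)] [(src.1, src.2)] [src] (PySem.Dict.empty.insert src 0) := by
    refine ⟨by simp, ?_, by simp [hm0], by rw [hm0]; exact List.nodup_singleton _,
      ?_, List.nodup_singleton _, ?_, ?_⟩
    · intro t ht
      rw [List.mem_singleton] at ht
      subst ht
      exact PySem.Dict.get?_insert_self _ _ _
    · intro k hk
      rw [hm0, List.mem_singleton] at hk
      subst hk
      exact hg
    · intro v hv
      simp only [PySem.Dict.values, hi0] at hv
      rw [List.map_singleton, List.mem_singleton] at hv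
      omega
    · intro k hk hq
      rw [hm0, List.mem_singleton] at hk
      subst hk
      exact absurd (List.mem_singleton.2 rfl) hq
  have hpw : List.Pairwise goodD ([((src.1 : Int), (src.2 : Int), (0 : Int))].map
      (fun t => t.2.2)) := by
    rw [List.map_singleton]
    exact List.pairwise_singleton _ _
  have hfuel : [((src.1 : Int), (src.2 : Int), (0 : Int))].length +
      ((maps.length : Int)).toNat * (((maps.headD "").toList.length : Int)).toNat ≤
      (maps.length * (maps.headD "").toList.length + 1) +
        (PySem.Dict.empty.insert src (0 : Int)).keys.length := by
    rw [hm0]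
    simp only [List.length_singleton, Int.toNat_natCast]
    omega
  obtain ⟨e1, e2, e3, e4⟩ := main_sim maps target (maps.length : Int)
    ((maps.headD "").toList.length : Int)
    (maps.length * (maps.headD "").toList.length + 1)
    [(src.1, src.2, 0)] [(src.1, src.2)] [src] (PySem.Dict.empty.insert src 0)
    hrel hpw hfuel
  exact ⟨e1, e2, e3, e4⟩

-- ===== VERDICT (by name: the statement is the Claim_ definition above) =====
theorem solution_spec : Claim_equal_solution := by
  unfold Claim_equal_solution
  intro maps _hdom hpre
  unfold Spec_solution
  obtain ⟨hne, hrows, hS⟩ := hpre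
  have hSg : ∃ k, inGrid (maps.length : Int) ((maps.headD "").toList.length : Int) k ∧
      pyCharAt maps k.1 k.2 = 'S' := by
    obtain ⟨s, hsmem, hSin⟩ := hS
    obtain ⟨i, hi, rfl⟩ := List.mem_iff_getElem.1 hsmem
    obtain ⟨j, hj, hSj⟩ := List.mem_iff_getElem.1 hSin
    rw [List.length_take] at hj
    have hjlen : j < maps[i].toList.length := by
      have := hrows maps[i] (List.getElem_mem hi)
      omega
    refine ⟨((i : Int), (j : Int)), ⟨?_, ?_, ?_, ?_⟩, ?_⟩
    · show (0 : Int) ≤ (i : Int)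
      omega
    · show (i : Int) < (maps.length : Int)
      exact_mod_cast hi
    · show (0 : Int) ≤ (j : Int)
      omega
    · show (j : Int) < ((maps.headD "").toList.length : Int)
      have : j < (maps.headD "").toList.length := by omega
      exact_mod_cast this
    · show pyCharAt maps (i : Int) (j : Int) = 'S'
      rw [charAt_eq maps i j hi hjlen]
      rw [← hSj, List.getElem_take]
  obtain ⟨start, hstart⟩ := Option.isSome_iff_exists.1
    (scanA_finds_S maps (maps.length : Int) ((maps.headD "").toList.length : Int) hSg)
  obtain ⟨hsg, _⟩ := (scanA_sound maps (maps.length : Int)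
    ((maps.headD "").toList.length : Int)).1 start hstart
  obtain ⟨hb1, hnd1, hg1, hv1⟩ := bfs_eq_flood maps 'L' start hsg
  unfold solution solution_alt
  dsimp only
  rw [scanB_eq maps (maps.length : Int) ((maps.headD "").toList.length : Int)]
  rw [hstart]
  dsimp only
  rw [hb1]
  cases hnl : nearest maps (flood maps start) 'L' with
  | none => simp
  | some dl =>
    obtain ⟨hdlv, k, hkk, hkch⟩ := nearest_some maps (flood maps start) 'L' dl hnl
    have hdl0 : 0 ≤ dl := hv1 dl hdlv
    obtain ⟨lever, hlever⟩ := Option.isSome_iff_exists.1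
      (scanA_finds_L maps (maps.length : Int) ((maps.headD "").toList.length : Int)
        ⟨k, hg1 k hkk, hkch⟩)
    obtain ⟨hlg, _⟩ := (scanA_sound maps (maps.length : Int)
      ((maps.headD "").toList.length : Int)).2 lever hlever
    obtain ⟨hb2, _hnd2, hg2, hv2⟩ := bfs_eq_flood maps 'E' lever hlg
    rw [hlever]
    dsimp only
    rw [hb2]
    simp only [Option.getD_some]
    rw [if_neg (by omega : ¬ dl = -1)]
    cases hne2 : nearest maps (flood maps lever) 'E' with
    | none => simp
    | some de =>
      obtain ⟨hdev, _⟩ := nearest_some maps (flood maps lever) 'E' de hne2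
      have hde0 : 0 ≤ de := hv2 de hdev
      simp only [Option.getD_some]
      rw [if_neg (by omega : ¬ de = -1)]
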